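-- pv_equiv track=rewrite | github.com/statycc/LQICM_On_C_Toy_Parser | peel.py | is_source
-- ===== SOURCE A (Python) =====
-- def is_source(cur_ind, graph, list_deg):
--     """Check if the variable modified in the current command is used as a source for any other command in the loop """
--     used = False
--     var_out = []
--     deg_max = 0
--     for (source_ind, target_ind, used_var) in graph:
--         if source_ind == cur_ind and not used:
--             used = True
--             if list_deg[target_ind] == -1:
--                 deg_max = -1
--             else:
--                 if target_ind > source_ind and list_deg[target_ind] > deg_max:
--                     deg_max = list_deg[target_ind]
--                 if not target_ind > source_ind and list_deg[target_ind] - 1 > deg_max: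
--                     deg_max = list_deg[target_ind] - 1
--             var_out.append((used_var, deg_max))
--     return var_out
-- ===== SOURCE B (Python) =====
-- def is_source(cur_ind, graph, list_deg):
--     """Check if the variable modified in the current command is used as a source for any other command in the loop """
--     if not graph:
--         return []
--     source_ind, target_ind, used_var = graph[0]
--     if source_ind != cur_ind:
--         return is_source(cur_ind, graph[1:], list_deg)
--     d = list_deg[target_ind]
--     if d == -1:
--         deg_max = -1
--     elif target_ind > source_ind:
--         deg_max = max(d, 0)
--     else:
--         deg_max = max(d - 1, 0)
--     return [(used_var, deg_max)]
-- ===== Notes on version B (the rewrite author's own statement) =====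
-- stated objective: simpler
-- what changed: Replaces A's single-pass loop with a used-flag and compare-and-update accumulator by structural recursion on the graph: recurse past non-matching head edges, and at the first matching head compute the degree bound directly as a max and return a singleton.
import Mathlib
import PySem

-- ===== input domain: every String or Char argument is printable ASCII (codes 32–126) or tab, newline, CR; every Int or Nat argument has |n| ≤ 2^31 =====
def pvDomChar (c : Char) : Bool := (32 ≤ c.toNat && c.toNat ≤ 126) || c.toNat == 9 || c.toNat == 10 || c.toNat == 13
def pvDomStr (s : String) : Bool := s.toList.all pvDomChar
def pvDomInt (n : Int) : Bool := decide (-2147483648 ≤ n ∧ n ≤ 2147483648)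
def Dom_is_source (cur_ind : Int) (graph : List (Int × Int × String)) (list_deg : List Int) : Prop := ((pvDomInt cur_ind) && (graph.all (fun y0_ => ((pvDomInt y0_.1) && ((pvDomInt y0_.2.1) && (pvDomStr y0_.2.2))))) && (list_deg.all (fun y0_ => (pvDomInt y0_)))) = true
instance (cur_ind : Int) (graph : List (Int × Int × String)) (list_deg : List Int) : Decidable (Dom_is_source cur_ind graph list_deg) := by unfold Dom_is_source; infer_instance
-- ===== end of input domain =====

-- B replaces A's flag-carrying loop by structural recursion on the graph (objective: simpler).
-- ===== PORT A =====
def is_source (cur_ind : Int) (graph : List (Int × Int × String)) (list_deg : List Int) : List (String × Int) :=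
  -- state: (used, var_out, deg_max); e = (source_ind, target_ind, used_var);
  -- list_deg[target_ind]: Python raises IndexError when out of range (excluded by Pre_); .getD 0 unreachable there
  (graph.foldl (fun (st : Bool × List (String × Int) × Int) e =>
    if e.1 == cur_ind && !st.1 then
      if (PySem.List.pyGet? list_deg e.2.1).getD 0 == -1 then (true, st.2.1 ++ [(e.2.2, -1)], -1)
      else
        (true, st.2.1 ++ [(e.2.2,
           if !(e.2.1 > e.1) && (PySem.List.pyGet? list_deg e.2.1).getD 0 - 1 >
               (if e.2.1 > e.1 && (PySem.List.pyGet? list_deg e.2.1).getD 0 > st.2.2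
                then (PySem.List.pyGet? list_deg e.2.1).getD 0 else st.2.2)
           then (PySem.List.pyGet? list_deg e.2.1).getD 0 - 1
           else (if e.2.1 > e.1 && (PySem.List.pyGet? list_deg e.2.1).getD 0 > st.2.2
                 then (PySem.List.pyGet? list_deg e.2.1).getD 0 else st.2.2))],
         if !(e.2.1 > e.1) && (PySem.List.pyGet? list_deg e.2.1).getD 0 - 1 >
             (if e.2.1 > e.1 && (PySem.List.pyGet? list_deg e.2.1).getD 0 > st.2.2
              then (PySem.List.pyGet? list_deg e.2.1).getD 0 else st.2.2)
         then (PySem.List.pyGet? list_deg e.2.1).getD 0 - 1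
         else (if e.2.1 > e.1 && (PySem.List.pyGet? list_deg e.2.1).getD 0 > st.2.2
               then (PySem.List.pyGet? list_deg e.2.1).getD 0 else st.2.2))
    else st) (false, [], 0)).2.1

-- ===== PORT B =====
def is_source_alt (cur_ind : Int) (graph : List (Int × Int × String)) (list_deg : List Int) : List (String × Int) :=
  match graph with
  | [] => []
  | e :: rest =>
    if e.1 ≠ cur_ind then is_source_alt cur_ind rest list_deg
    else
      -- list_deg[target_ind]: raises when out of range (excluded by Pre_); .getD 0 unreachable there
      let d := (PySem.List.pyGet? list_deg e.2.1).getD 0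
      let deg_max := if d == -1 then -1
        else if e.2.1 > e.1 then max d 0 else max (d - 1) 0
      [(e.2.2, deg_max)]

-- ===== PRECONDITION & SPEC =====
-- Pre_ excludes exactly the inputs where Python A raises IndexError: the first edge leaving
-- cur_ind (the only one A indexes list_deg at) has a target index out of range for list_deg.
def Pre_is_source (cur_ind : Int) (graph : List (Int × Int × String)) (list_deg : List Int) : Prop :=
  ∀ e ∈ graph.find? (fun e => e.1 == cur_ind), (PySem.List.pyGet? list_deg e.2.1).isSome
instance (cur_ind : Int) (graph : List (Int × Int × String)) (list_deg : List Int) : Decidable (Pre_is_source cur_ind graph list_deg) := by unfold Pre_is_source; infer_instance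
def pvWitness_is_source : Int × (List (Int × Int × String)) × List Int := (1, [(0, 0, "a"), (1, 1, "x"), (1, 0, "y")], [3, 2])
def Spec_is_source (cur_ind : Int) (graph : List (Int × Int × String)) (list_deg : List Int) (out : List (String × Int)) : Prop := out = is_source_alt cur_ind graph list_deg
instance (cur_ind : Int) (graph : List (Int × Int × String)) (list_deg : List Int) (out : List (String × Int)) : Decidable (Spec_is_source cur_ind graph list_deg out) := by unfold Spec_is_source; infer_instance

-- ===== CLAIM (what is proved, stated in full; the proofs are below) =====
def Claim_equal_is_source : Prop := ∀ (cur_ind : Int) (graph : List (Int × Int × String)) (list_deg : List Int), Dom_is_source cur_ind graph list_deg → Pre_is_source cur_ind graph list_deg → Spec_is_source cur_ind graph list_deg (is_source cur_ind graph list_deg)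

-- ===== LEMMAS AND PROOFS =====

-- once `used` is true, A's fold step is the identity
theorem foldl_step_used (cur_ind : Int) (list_deg : List Int)
    (l : List (Int × Int × String)) (out : List (String × Int)) (dm : Int) :
    l.foldl (fun (st : Bool × List (String × Int) × Int) e =>
      if e.1 == cur_ind && !st.1 then
        if (PySem.List.pyGet? list_deg e.2.1).getD 0 == -1 then (true, st.2.1 ++ [(e.2.2, -1)], -1)
        else
          (true, st.2.1 ++ [(e.2.2,
             if !(e.2.1 > e.1) && (PySem.List.pyGet? list_deg e.2.1).getD 0 - 1 >
                 (if e.2.1 > e.1 && (PySem.List.pyGet? list_deg e.2.1).getD 0 > st.2.2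
                  then (PySem.List.pyGet? list_deg e.2.1).getD 0 else st.2.2)
             then (PySem.List.pyGet? list_deg e.2.1).getD 0 - 1
             else (if e.2.1 > e.1 && (PySem.List.pyGet? list_deg e.2.1).getD 0 > st.2.2
                   then (PySem.List.pyGet? list_deg e.2.1).getD 0 else st.2.2))],
           if !(e.2.1 > e.1) && (PySem.List.pyGet? list_deg e.2.1).getD 0 - 1 >
               (if e.2.1 > e.1 && (PySem.List.pyGet? list_deg e.2.1).getD 0 > st.2.2
                then (PySem.List.pyGet? list_deg e.2.1).getD 0 else st.2.2)
           then (PySem.List.pyGet? list_deg e.2.1).getD 0 - 1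
           else (if e.2.1 > e.1 && (PySem.List.pyGet? list_deg e.2.1).getD 0 > st.2.2
                 then (PySem.List.pyGet? list_deg e.2.1).getD 0 else st.2.2))
      else st) (true, out, dm) = (true, out, dm) := by
  induction l with
  | nil => rfl
  | cons e l ih => simpa using ih

theorem is_source_spec : Claim_equal_is_source := by
  intro cur_ind graph list_deg hdom hpre
  unfold Spec_is_source
  clear hdom
  induction graph with
  | nil => rfl
  | cons e l ih =>
    by_cases hm : e.1 = cur_ind
    · have hb : (e.1 == cur_ind) = true := by simpa using hm
      unfold is_source is_source_alt
      rw [List.foldl_cons, if_pos (by simp [hb])]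
      by_cases hneg : (PySem.List.pyGet? list_deg e.2.1).getD 0 = -1
      · rw [if_pos (by simpa using hneg), foldl_step_used]
        simp [hm, hneg]
      · rw [if_neg (by simpa using hneg), foldl_step_used]
        simp only [hm, ne_eq, not_true_eq_false, if_false, List.nil_append,
          List.cons.injEq, Prod.mk.injEq, true_and, and_true]
        split_ifs <;> simp_all <;> omega
    · have hb : (e.1 == cur_ind) = false := by simpa using hm
      have hpre' : Pre_is_source cur_ind l list_deg := by
        simpa [Pre_is_source, hb] using hpre
      unfold is_source is_source_alt
      rw [List.foldl_cons, if_neg (by simp [hb])]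
      rw [if_pos (by simpa using hm)]
      simpa [is_source, is_source_alt] using ih hpre'

theorem pvWitness_ok : Dom_is_source pvWitness_is_source.1 pvWitness_is_source.2.1 pvWitness_is_source.2.2 ∧ Pre_is_source pvWitness_is_source.1 pvWitness_is_source.2.1 pvWitness_is_source.2.2 := by decide
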